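-- pv_equiv track=rewrite | github.com/zubie7a/Algorithms | CodeSignal/Arcade/The_Core/Level_04_Loop_Tunnel/032_Rounders.py | rounders
-- ===== SOURCE A (Python) =====
-- def rounders(n):
--     # Turn a number into a number with only one non-zero digit using tail rounding.
--     # If a digit is < 5, we round it to 0, if its >= 5, we round it to 10, which
--     # still makes the digit 0 but carries one over. At the end it should be all
--     # zeros except the leftmost possition.
--     str_n = str(n)[::-1]
--     result = ""
--     carry = 0
--     # Since the number has been reversed, we can iterate normally from left to right.
--     for i in range(len(str_n)):
--         digit = int(str_n[i])
--         # Add the previous carry.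
--         digit = digit + carry
--         # Reset the carry.
--         carry = 0
--         # Check that is not the last digit, round everything except it.
--         if i + 1 < len(str_n):
--             # Check if the digit with the carry so far has exceeded 10.
--             if digit >= 5:
--                 carry = 1
--             # Regardless of rounding up or down, all digits except the last will be
--             # rounded to 0, but the rounded ups will create a carry over.
--             digit = 0
--         # The last digit is a special case, it should not be rounded. However,
--         # if the last digit was 9 and there was a carry over, then the "digit"
--         # would really be a 10, but will still be appended normally.
--         result = ("{}".format(digit)) + result
--
--     return int(result)
-- ===== SOURCE B (Python) =====
-- def rounders(n):
--     if n < 10: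
--         return n
--     return 10 * rounders((n + 5) // 10)
-- ===== Notes on version B (the rewrite author's own statement) =====
-- stated objective: simpler
-- what changed: Replaces A's string-reverse-and-carry digit loop (str(n)[::-1], per-character int(), string rebuild, final int()) with pure integer arithmetic: base case n < 10, otherwise 10 * rounders((n + 5) // 10), where (n+5)//10 is exactly round-half-up with carry propagation.
import Mathlib
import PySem

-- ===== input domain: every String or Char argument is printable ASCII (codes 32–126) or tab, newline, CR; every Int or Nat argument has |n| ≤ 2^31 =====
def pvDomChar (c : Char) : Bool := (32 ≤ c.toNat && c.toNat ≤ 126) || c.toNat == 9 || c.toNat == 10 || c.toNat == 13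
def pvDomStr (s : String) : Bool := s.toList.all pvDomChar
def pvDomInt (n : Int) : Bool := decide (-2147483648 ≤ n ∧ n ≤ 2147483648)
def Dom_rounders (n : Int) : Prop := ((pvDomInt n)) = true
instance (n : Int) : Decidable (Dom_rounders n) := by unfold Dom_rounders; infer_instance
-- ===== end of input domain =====

-- B replaces A's string-reverse-and-carry digit loop by pure integer arithmetic:
-- round-half-up one digit at a time via 10 * rounders((n + 5) // 10). Objective: simpler.

-- ===== PORT A =====
-- the `for i in range(len(str_n))` loop, transcribed as structural recursion over the
-- reversed character list with the same state (result, carry); `rest = []` is `i + 1 < len(str_n)`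
-- failing; `int(str_n[i])` is `(PySem.Int.ofChars? [c]).getD 0` — the `none` (ValueError on the
-- '-' of a negative n) case is excluded by Pre_rounders, so the `.getD 0` default is never used there.
def rounders_loop : List Char → List Char → Int → List Char
  | [], result, _ => result
  | c :: rest, result, carry =>
    -- digit = int(str_n[i]) + carry ; carry = 0
    let digit : Int := (PySem.Int.ofChars? [c]).getD 0 + carry
    if rest = [] then
      -- last character: result = "{}".format(digit) + result, loop ends
      PySem.Int.toChars digit ++ result
    else
      -- carry = 1 if digit >= 5; digit = 0; result = "{}".format(0) + result
      rounders_loop rest (PySem.Int.toChars 0 ++ result) (if 5 ≤ digit then 1 else 0)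

-- str(n)[::-1] is the reversed character list of str(n); int(result) is ofChars?,
-- whose `none` (empty string, impossible here) is defaulted to 0.
def rounders (n : Int) : Int :=
  let str_n := (PySem.Int.toChars n).reverse
  (PySem.Int.ofChars? (rounders_loop str_n [] 0)).getD 0

-- ===== PORT B =====
def rounders_alt (n : Int) : Int :=
  if n < 10 then n else 10 * rounders_alt (PySem.Int.floordiv (n + 5) 10)
termination_by n.toNat
decreasing_by
  rename_i _h
  rw [PySem.Int.floordiv_eq_ediv_of_pos (by norm_num)]
  have h10 : (10:Int) ≤ n := by omega
  have h1 : (n + 5) / 10 < n := by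
    rw [Int.ediv_lt_iff_lt_mul (by norm_num)]; omega
  have h0 : 0 ≤ (n + 5) / 10 := by positivity
  omega

-- ===== PRECONDITION & SPEC =====
-- Pre_ excludes exactly the negative inputs: there A raises ValueError
-- (int('-') on the reversed sign character).
def Pre_rounders (n : Int) : Prop := 0 ≤ n
instance (n : Int) : Decidable (Pre_rounders n) := by unfold Pre_rounders; infer_instance
def pvWitness_rounders : Int := 1234

def Spec_rounders (n : Int) (out : Int) : Prop := out = rounders_alt n
instance (n : Int) (out : Int) : Decidable (Spec_rounders n out) := by unfold Spec_rounders; infer_instance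

-- ===== CLAIM (what is proved, stated in full; the proofs are below) =====
def Claim_equal_rounders : Prop := ∀ (n : Int), Dom_rounders n → Pre_rounders n → Spec_rounders n (rounders n)

-- ===== LEMMAS AND PROOFS =====

-- the digit characters of m, most significant first (what str(m) prints for m ≥ 0)
def pvD (m : Nat) : List Char :=
  if _h : m < 10 then [Nat.digitChar m] else pvD (m / 10) ++ [Nat.digitChar (m % 10)]
termination_by m
decreasing_by exact Nat.div_lt_self (by omega) (by norm_num)

-- the value A's carry loop leaves in the leading position
def pvV (m : Nat) (c : Int) : Int :=
  if h : m < 10 then (m : Int) + c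
  else pvV (m / 10) (if 5 ≤ (m % 10 : Int) + c then 1 else 0)
termination_by m
decreasing_by exact Nat.div_lt_self (by omega) (by norm_num)

-- number of trailing zeros A's loop writes (= number of digits of m minus one)
def pvZ (m : Nat) : Nat :=
  if h : m < 10 then 0 else pvZ (m / 10) + 1
termination_by m
decreasing_by exact Nat.div_lt_self (by omega) (by norm_num)

lemma toDigitsCore_eq_pvD : ∀ (f m : Nat) (ds : List Char), m < f →
    Nat.toDigitsCore 10 f m ds = pvD m ++ ds := by
  intro f
  induction f with
  | zero => omega
  | succ f ih =>
    intro m ds hm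
    rw [Nat.toDigitsCore]
    by_cases h10 : m < 10
    · have h0 : m / 10 = 0 := by omega
      simp only [h0, reduceIte]
      rw [pvD, dif_pos h10, Nat.mod_eq_of_lt h10]
      simp
    · have hne : ¬ m / 10 = 0 := by omega
      have hlt : m / 10 < f := by omega
      simp only [hne, if_false, ih _ _ hlt]
      conv_rhs => rw [pvD, dif_neg h10]
      simp

lemma toChars_eq_pvD (n : Int) (hn : 0 ≤ n) : PySem.Int.toChars n = pvD n.toNat := by
  rw [PySem.Int.toChars, if_neg (by omega)]
  exact toDigitsCore_eq_pvD _ _ [] (Nat.lt_succ_self _) |>.trans (by simp)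

lemma pvD_ne_nil (m : Nat) : pvD m ≠ [] := by
  rw [pvD]
  split <;> simp

lemma parse_digitChar (d : Nat) (hd : d < 10) :
    (PySem.Int.ofChars? [Nat.digitChar d]).getD 0 = (d : Int) := by
  interval_cases d <;> decide

lemma loop_spec : ∀ (m : Nat) (c : Int), (c = 0 ∨ c = 1) → ∀ (acc : List Char),
    rounders_loop (pvD m).reverse acc c
      = PySem.Int.toChars (pvV m c) ++ (List.replicate (pvZ m) '0' ++ acc) := by
  intro m
  induction m using Nat.strong_induction_on with
  | _ m ih =>
    intro c hc acc
    by_cases h10 : m < 10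
    · rw [pvD, dif_pos h10, pvV, dif_pos h10, pvZ, dif_pos h10]
      simp only [List.reverse_singleton, rounders_loop, reduceIte,
        parse_digitChar m h10, List.replicate_zero, List.nil_append]
    · rw [pvD, dif_neg h10, pvV, dif_neg h10, pvZ, dif_neg h10]
      rw [List.reverse_append, List.reverse_singleton, List.singleton_append]
      rw [rounders_loop]
      simp only [List.reverse_eq_nil_iff, pvD_ne_nil, if_false,
        parse_digitChar (m % 10) (by omega)]
      rw [ih (m / 10) (Nat.div_lt_self (by omega) (by norm_num)) _ (by split <;> simp) _]
      have : PySem.Int.toChars 0 = ['0'] := by decide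
      rw [this, List.replicate_succ']
      simp
      rfl

lemma pvV_bounds : ∀ (m : Nat) (c : Int), (c = 0 ∨ c = 1) →
    0 ≤ pvV m c ∧ pvV m c ≤ 10 := by
  intro m
  induction m using Nat.strong_induction_on with
  | _ m ih =>
    intro c hc
    rw [pvV]
    split
    · rename_i h10; omega
    · exact ih (m / 10) (Nat.div_lt_self (by omega) (by norm_num)) _ (by split <;> simp)

lemma pvZ_le : ∀ (k m : Nat), m < 10 ^ (k + 1) → pvZ m ≤ k := by
  intro k
  induction k with
  | zero =>
    intro m hm
    rw [pvZ, dif_pos (by norm_num at hm; omega)]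
  | succ k ih =>
    intro m hm
    rw [pvZ]
    split
    · omega
    · have : m / 10 < 10 ^ (k + 1) := by
        rw [Nat.div_lt_iff_lt_mul (by norm_num)]
        calc m < 10 ^ (k + 2) := hm
        _ = 10 ^ (k + 1) * 10 := by ring
      exact Nat.succ_le_succ (ih _ this)

lemma parse_value (v : Int) (hv0 : 0 ≤ v) (hv1 : v ≤ 10) (k : Nat) (hk : k ≤ 9) :
    PySem.Int.ofChars? (PySem.Int.toChars v ++ List.replicate k '0') = some (v * 10 ^ k) := by
  interval_cases v <;> interval_cases k <;> decide

lemma alt_eq : rounders_alt = fun n =>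
    if n < 10 then n else 10 * rounders_alt (PySem.Int.floordiv (n + 5) 10) := by
  funext n; rw [rounders_alt]

lemma alt_spec : ∀ (m : Nat) (c : Int), (c = 0 ∨ c = 1) →
    rounders_alt ((m : Int) + c) = pvV m c * 10 ^ pvZ m := by
  intro m
  induction m using Nat.strong_induction_on with
  | _ m ih =>
    intro c hc
    by_cases h10 : m < 10
    · rw [pvV, dif_pos h10, pvZ, dif_pos h10, pow_zero, mul_one]
      by_cases hlast : (m : Int) + c < 10
      · rw [alt_eq]; simp only [if_pos hlast]
      · -- only m = 9, c = 1 reaches here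
        have hm9 : m = 9 ∧ c = 1 := by omega
        obtain ⟨hm, hcc⟩ := hm9
        subst hm; subst hcc
        rw [alt_eq]
        norm_num
        rw [alt_eq]
        norm_num
    · have hstep : (m : Int) + c ≥ 10 := by omega
      rw [alt_eq]
      beta_reduce
      rw [if_neg (show ¬ ((m : Int) + c < 10) by omega)]
      rw [pvV, dif_neg h10, pvZ, dif_neg h10]
      have hfd : PySem.Int.floordiv ((m : Int) + c + 5) 10
          = ((m / 10 : Nat) : Int) + (if 5 ≤ (m % 10 : Int) + c then 1 else 0) := by
        rw [PySem.Int.floordiv_eq_ediv_of_pos (by norm_num)]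
        have h1 : (m : Int) = 10 * ((m / 10 : Nat) : Int) + ((m % 10 : Nat) : Int) := by
          push_cast; omega
        have h2 : ((m % 10 : Nat) : Int) < 10 := by push_cast; omega
        have h3 : 0 ≤ ((m % 10 : Nat) : Int) := by positivity
        split <;> rename_i hcond <;> omega
      rw [hfd]
      rw [ih (m / 10) (Nat.div_lt_self (by omega) (by norm_num)) _ (by split <;> simp)]
      rw [pow_succ]
      ring

-- ===== VERDICT (by name: the statement is the Claim_ definition above) =====
theorem rounders_spec : Claim_equal_rounders := by
  intro n hdom hpre
  unfold Spec_rounders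
  unfold Pre_rounders at hpre
  have hm : n = ((n.toNat : Nat) : Int) := by omega
  set m := n.toNat with hmdef
  have hrounders : rounders n = pvV m 0 * 10 ^ pvZ m := by
    show (PySem.Int.ofChars? (rounders_loop ((PySem.Int.toChars n).reverse) [] 0)).getD 0 = _
    rw [toChars_eq_pvD n hpre, loop_spec m 0 (Or.inl rfl) []]
    have hb := pvV_bounds m 0 (Or.inl rfl)
    have hz : pvZ m ≤ 9 := by
      apply pvZ_le 9
      have hn : n ≤ 2147483648 := by
        unfold Dom_rounders pvDomInt at hdom
        simpa using (of_decide_eq_true hdom).2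
      norm_num
      omega
    rw [List.append_nil, parse_value _ hb.1 hb.2 _ hz]
    rfl
  rw [hrounders, hm, ← alt_spec m 0 (Or.inl rfl)]
  norm_num
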